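-- pv_equiv track=rewrite | github.com/Hyperbuilder/StockMonke | CalcLegalMoves.py | PieceSpecificMoves
-- ===== SOURCE A (Python) =====
-- def PieceSpecificMoves(SelectedPiece, LegalMoves):
--     PieceSpecificLegalMoves = [[], [], []]
--     for selectedPieceIndexPos, selectedPiece in enumerate(LegalMoves[0]):
--         if (selectedPiece == SelectedPiece):
--             PieceSpecificLegalMoves[0].append(LegalMoves[0][selectedPieceIndexPos])
--             PieceSpecificLegalMoves[1].append(LegalMoves[1][selectedPieceIndexPos])
--             PieceSpecificLegalMoves[2].append(LegalMoves[2][selectedPieceIndexPos])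
--     return PieceSpecificLegalMoves
-- ===== SOURCE B (Python) =====
-- def PieceSpecificMoves(SelectedPiece, LegalMoves):
--     triples = [(v, LegalMoves[1][i], LegalMoves[2][i])
--                for i, v in enumerate(LegalMoves[0]) if v == SelectedPiece]
--     return [[t[0] for t in triples],
--             [t[1] for t in triples],
--             [t[2] for t in triples]]
-- ===== Notes on version B (the rewrite author's own statement) =====
-- stated objective: alternative
-- what changed: B makes one pass that collects the matching (row0,row1,row2) triples into a single list and then unzips that list into the three output rows by projection, instead of A's loop interleaving appends to three separate accumulators.
import Mathlib
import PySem

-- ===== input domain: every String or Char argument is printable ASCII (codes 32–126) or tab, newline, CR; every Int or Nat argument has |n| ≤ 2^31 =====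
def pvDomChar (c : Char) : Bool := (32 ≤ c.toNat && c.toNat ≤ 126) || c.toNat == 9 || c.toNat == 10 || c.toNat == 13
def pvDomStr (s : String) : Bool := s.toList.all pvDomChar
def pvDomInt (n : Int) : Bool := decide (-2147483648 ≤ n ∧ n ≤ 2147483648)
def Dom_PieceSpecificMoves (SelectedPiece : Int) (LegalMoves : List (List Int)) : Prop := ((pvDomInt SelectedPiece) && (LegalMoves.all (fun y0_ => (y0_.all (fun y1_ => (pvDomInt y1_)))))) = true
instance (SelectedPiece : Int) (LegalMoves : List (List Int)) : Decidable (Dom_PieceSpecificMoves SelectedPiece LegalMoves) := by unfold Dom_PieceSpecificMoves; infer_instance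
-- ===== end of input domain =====

-- B gathers the matching (row0,row1,row2) triples into one list in a single pass and
-- then unzips it into the three output rows, instead of A's interleaved three-append
-- loop; objective: alternative decomposition, same cost.

-- ===== PORT A =====
-- single loop over enumerate(LegalMoves[0]) appending to three accumulators
def PieceSpecificMoves (SelectedPiece : Int) (LegalMoves : List (List Int)) : List (List Int) :=
  let r := (PySem.List.enumerate ((PySem.List.pyGet? LegalMoves 0).getD []) 0).foldl
    (fun (acc : List Int × List Int × List Int) p =>
      if p.2 == SelectedPiece then
        (acc.1 ++ [PySem.List.pyGetD ((PySem.List.pyGet? LegalMoves 0).getD []) p.1 0],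
         acc.2.1 ++ [PySem.List.pyGetD ((PySem.List.pyGet? LegalMoves 1).getD []) p.1 0],
         acc.2.2 ++ [PySem.List.pyGetD ((PySem.List.pyGet? LegalMoves 2).getD []) p.1 0])
      else acc) ([], [], [])
  [r.1, r.2.1, r.2.2]

-- ===== PORT B =====
-- one pass gathering matched triples, then unzip by projection
def PieceSpecificMoves_alt (SelectedPiece : Int) (LegalMoves : List (List Int)) : List (List Int) :=
  let triples : List (Int × Int × Int) :=
    (PySem.List.enumerate ((PySem.List.pyGet? LegalMoves 0).getD []) 0).filterMap
      (fun p =>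
        if p.2 == SelectedPiece then
          some (p.2, PySem.List.pyGetD ((PySem.List.pyGet? LegalMoves 1).getD []) p.1 0,
                PySem.List.pyGetD ((PySem.List.pyGet? LegalMoves 2).getD []) p.1 0)
        else none)
  [triples.map (·.1), triples.map (·.2.1), triples.map (·.2.2)]

-- ===== PRECONDITION & SPEC =====
-- Pre_ excludes exactly the inputs where the Python raises IndexError (in both A and B):
-- LegalMoves empty, or some matching position has no in-range entry in rows 1 and 2.
def Pre_PieceSpecificMoves (SelectedPiece : Int) (LegalMoves : List (List Int)) : Prop :=
  LegalMoves ≠ [] ∧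
  ∀ p ∈ PySem.List.enumerate ((PySem.List.pyGet? LegalMoves 0).getD []) 0, p.2 = SelectedPiece →
    3 ≤ LegalMoves.length ∧
    PySem.Raise.InRange ((PySem.List.pyGet? LegalMoves 1).getD []).length p.1 ∧
    PySem.Raise.InRange ((PySem.List.pyGet? LegalMoves 2).getD []).length p.1
instance (SelectedPiece : Int) (LegalMoves : List (List Int)) : Decidable (Pre_PieceSpecificMoves SelectedPiece LegalMoves) := by unfold Pre_PieceSpecificMoves; infer_instance
def pvWitness_PieceSpecificMoves : Int × List (List Int) := (1, [[1, 2, 1], [4, 5, 6], [7, 8, 9]])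

def Spec_PieceSpecificMoves (SelectedPiece : Int) (LegalMoves : List (List Int)) (out : List (List Int)) : Prop := out = PieceSpecificMoves_alt SelectedPiece LegalMoves
instance (SelectedPiece : Int) (LegalMoves : List (List Int)) (out : List (List Int)) : Decidable (Spec_PieceSpecificMoves SelectedPiece LegalMoves out) := by unfold Spec_PieceSpecificMoves; infer_instance

-- ===== CLAIM (what is proved, stated in full; the proofs are below) =====
def Claim_equal_PieceSpecificMoves : Prop := ∀ (SelectedPiece : Int) (LegalMoves : List (List Int)), Dom_PieceSpecificMoves SelectedPiece LegalMoves → Pre_PieceSpecificMoves SelectedPiece LegalMoves → Spec_PieceSpecificMoves SelectedPiece LegalMoves (PieceSpecificMoves SelectedPiece LegalMoves)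

-- ===== LEMMAS AND PROOFS =====

-- indexing back into the enumerated list returns the enumerated element
theorem pyGetD_enumerate_mem (l : List Int) (p : Int × Int)
    (hp : p ∈ PySem.List.enumerate l 0) (d : Int) :
    PySem.List.pyGetD l p.1 d = p.2 := by
  rw [PySem.List.mem_enumerate_iff] at hp
  obtain ⟨k, hk, rfl⟩ := hp
  simp [List.getElem?_eq_getElem hk]

-- A's interleaved three-append fold equals B's triple-gathering pass followed by the
-- three projections, for any element functions g1 g2 and any accumulator contents.
theorem fold_eq_unzip (sp : Int) (g1 g2 : Int → Int) (l : List (Int × Int))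
    (a0 a1 a2 : List Int) :
    l.foldl (fun (acc : List Int × List Int × List Int) p =>
        if p.2 == sp then (acc.1 ++ [p.2], acc.2.1 ++ [g1 p.1], acc.2.2 ++ [g2 p.1])
        else acc) (a0, a1, a2)
    = (a0 ++ (l.filterMap (fun p => if p.2 == sp then some (p.2, g1 p.1, g2 p.1) else none)).map (·.1),
       a1 ++ (l.filterMap (fun p => if p.2 == sp then some (p.2, g1 p.1, g2 p.1) else none)).map (·.2.1),
       a2 ++ (l.filterMap (fun p => if p.2 == sp then some (p.2, g1 p.1, g2 p.1) else none)).map (·.2.2)) := by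
  induction l generalizing a0 a1 a2 with
  | nil => simp
  | cons h t ih =>
    simp only [List.foldl_cons, List.filterMap_cons]
    by_cases hc : h.2 = sp
    · simp only [hc, BEq.rfl, if_true, ih, List.append_assoc, List.map_cons,
        List.singleton_append]
    · rw [if_neg (by simpa using hc)]
      simpa [hc] using ih a0 a1 a2

-- ===== VERDICT (by name: the statement is the Claim_ definition above) =====
theorem PieceSpecificMoves_spec : Claim_equal_PieceSpecificMoves := by
  intro sp LM _ _
  show PieceSpecificMoves sp LM = PieceSpecificMoves_alt sp LM
  have hfold :
      (PySem.List.enumerate ((PySem.List.pyGet? LM 0).getD []) 0).foldl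
        (fun (acc : List Int × List Int × List Int) p =>
          if p.2 == sp then
            (acc.1 ++ [PySem.List.pyGetD ((PySem.List.pyGet? LM 0).getD []) p.1 0],
             acc.2.1 ++ [PySem.List.pyGetD ((PySem.List.pyGet? LM 1).getD []) p.1 0],
             acc.2.2 ++ [PySem.List.pyGetD ((PySem.List.pyGet? LM 2).getD []) p.1 0])
          else acc) ([], [], [])
      = (((PySem.List.enumerate ((PySem.List.pyGet? LM 0).getD []) 0).filterMap
            (fun p => if p.2 == sp then
                some (p.2, PySem.List.pyGetD ((PySem.List.pyGet? LM 1).getD []) p.1 0,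
                      PySem.List.pyGetD ((PySem.List.pyGet? LM 2).getD []) p.1 0)
              else none)).map (·.1),
         ((PySem.List.enumerate ((PySem.List.pyGet? LM 0).getD []) 0).filterMap
            (fun p => if p.2 == sp then
                some (p.2, PySem.List.pyGetD ((PySem.List.pyGet? LM 1).getD []) p.1 0,
                      PySem.List.pyGetD ((PySem.List.pyGet? LM 2).getD []) p.1 0)
              else none)).map (·.2.1),
         ((PySem.List.enumerate ((PySem.List.pyGet? LM 0).getD []) 0).filterMap
            (fun p => if p.2 == sp then
                some (p.2, PySem.List.pyGetD ((PySem.List.pyGet? LM 1).getD []) p.1 0,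
                      PySem.List.pyGetD ((PySem.List.pyGet? LM 2).getD []) p.1 0)
              else none)).map (·.2.2)) := by
    refine (List.foldl_ext _ (fun (acc : List Int × List Int × List Int) (p : Int × Int) =>
        if p.2 == sp then
          (acc.1 ++ [p.2],
           acc.2.1 ++ [PySem.List.pyGetD ((PySem.List.pyGet? LM 1).getD []) p.1 0],
           acc.2.2 ++ [PySem.List.pyGetD ((PySem.List.pyGet? LM 2).getD []) p.1 0])
        else acc) _ ?_).trans ?_
    · intro acc x hx
      by_cases hc : x.2 = sp
      · simp [hc, pyGetD_enumerate_mem _ _ hx]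
      · simp [hc]
    · simpa using fold_eq_unzip sp
        (fun i => PySem.List.pyGetD ((PySem.List.pyGet? LM 1).getD []) i 0)
        (fun i => PySem.List.pyGetD ((PySem.List.pyGet? LM 2).getD []) i 0)
        (PySem.List.enumerate ((PySem.List.pyGet? LM 0).getD []) 0) [] [] []
  simp only [PieceSpecificMoves, PieceSpecificMoves_alt]
  rw [hfold]
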